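-- pv_equiv track=rewrite | github.com/DamianPiuselli/adventofcode2025 | day2.py | repeating_number_part2
-- ===== SOURCE A (Python) =====
-- def repeating_number_part2(int):  # part2
--     s = str(int)
--     length = len(s)
--
--     for times in range(2, length + 1):
--         if length % times == 0:  # if "times" is a multiple of the length
--             segment = s[: length // times]
--             if segment * times == s:
--                 return True
--
--     return False
-- ===== SOURCE B (Python) =====
-- def repeating_number_part2(int):  # part2
--     s = str(int)
--     return s in (s + s)[1:-1]
-- ===== Notes on version B (the rewrite author's own statement) =====
-- stated objective: idiomatic
-- what changed: Replaced the explicit loop over divisor counts with segment reconstruction by the standard string-doubling periodicity idiom: s is a repetition of a shorter segment iff s occurs in (s+s)[1:-1].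
import Mathlib
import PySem

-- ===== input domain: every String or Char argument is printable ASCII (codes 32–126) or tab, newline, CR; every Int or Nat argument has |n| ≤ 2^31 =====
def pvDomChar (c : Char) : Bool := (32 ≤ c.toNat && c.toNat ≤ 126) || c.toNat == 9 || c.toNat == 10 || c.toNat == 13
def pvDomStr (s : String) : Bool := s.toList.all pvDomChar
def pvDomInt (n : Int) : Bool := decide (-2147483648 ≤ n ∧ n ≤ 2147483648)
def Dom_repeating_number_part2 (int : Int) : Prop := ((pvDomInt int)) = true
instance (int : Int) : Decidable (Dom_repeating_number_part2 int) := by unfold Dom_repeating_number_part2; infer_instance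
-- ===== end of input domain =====

-- B replaces A's loop over divisor counts (rebuilding segment*times each time) by the
-- string-doubling periodicity idiom `s in (s+s)[1:-1]`; equivalence is proved for all ints.

-- ===== PORT A =====
-- strings are handled as their character lists (PySem.Int.toChars n = str(n)); exact
def repeating_number_part2 (int : Int) : Bool :=
  let s : List Char := PySem.Int.toChars int
  let length : Int := (s.length : Int)
  (PySem.List.pyRange 2 (length + 1) 1).any (fun times =>
    if PySem.Int.mod length times == 0 then
      let segment := PySem.List.slice s none (some (PySem.Int.floordiv length times))
      PySem.List.pyRepeat segment times == s
    else false)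

-- ===== PORT B =====
def repeating_number_part2_alt (int : Int) : Bool :=
  let s : List Char := PySem.Int.toChars int
  PySem.Chars.isIn s (PySem.List.slice (s ++ s) (some 1) (some (-1)))

-- ===== PRECONDITION & SPEC =====
def Spec_repeating_number_part2 (int : Int) (out : Bool) : Prop := out = repeating_number_part2_alt int
instance (int : Int) (out : Bool) : Decidable (Spec_repeating_number_part2 int out) := by unfold Spec_repeating_number_part2; infer_instance

-- ===== CLAIM (what is proved, stated in full; the proofs are below) =====
def Claim_equal_repeating_number_part2 : Prop := ∀ (int : Int), Dom_repeating_number_part2 int → Spec_repeating_number_part2 int (repeating_number_part2 int)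

-- ===== LEMMAS AND PROOFS =====

-- str(int) is never empty
lemma pv_toDigitsCore_ne_nil (b : Nat) : ∀ (f n : Nat) (ds : List Char), ds ≠ [] →
    Nat.toDigitsCore b f n ds ≠ [] := by
  intro f
  induction f with
  | zero => intro n ds h; simpa [Nat.toDigitsCore] using h
  | succ f ih =>
    intro n ds h
    rw [Nat.toDigitsCore]
    split
    · simp
    · exact ih _ _ (by simp)

lemma pv_toChars_ne_nil (n : Int) : PySem.Int.toChars n ≠ [] := by
  unfold PySem.Int.toChars
  split
  · simp
  · rw [Nat.toDigits, Nat.toDigitsCore]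
    split
    · simp
    · exact pv_toDigitsCore_ne_nil _ _ _ _ (by simp)

-- taking |l| characters of l ++ l after dropping d ≤ |l| yields the rotation of l by d
lemma pv_drop_double_take (l : List Char) (d : Nat) (hd : d ≤ l.length) :
    ((l ++ l).drop d).take l.length = l.rotate d := by
  rw [List.drop_append_of_le_length hd, List.rotate_eq_drop_append_take hd, List.take_append]
  rw [List.take_of_length_le (by simp), List.length_drop]
  congr 2
  omega

-- a concatenation of copies of w is fixed by rotating by |w|
lemma pv_rotate_flatten_replicate (w : List Char) (m : Nat) :
    ((List.replicate (m + 1) w).flatten).rotate w.length = (List.replicate (m + 1) w).flatten := by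
  have h1 : (List.replicate (m + 1) w).flatten = w ++ (List.replicate m w).flatten := by
    rw [List.replicate_succ, List.flatten_cons]
  have h2 : (List.replicate (m + 1) w).flatten = (List.replicate m w).flatten ++ w := by
    rw [List.replicate_succ', List.flatten_append]; simp
  rw [h1, List.rotate_append_length_eq, ← h2, h1]

lemma pv_rotate_mul (l : List Char) (d k : Nat) (h : l.rotate d = l) : l.rotate (k * d) = l := by
  induction k with
  | zero => simp
  | succ k ih => calc l.rotate ((k + 1) * d) = (l.rotate (k * d)).rotate d := by
                        rw [List.rotate_rotate]; ring_nf
                  _ = l := by rw [ih, h]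

-- a fixed nontrivial rotation forces a fixed rotation by gcd d |l| (Bézout)
lemma pv_rotate_gcd (l : List Char) (d : Nat) (hd : 0 < d) (hdn : d < l.length)
    (h : l.rotate d = l) : l.rotate (Nat.gcd d l.length) = l := by
  set n := l.length with hn
  have hn0 : 0 < n := lt_of_le_of_lt (Nat.zero_le d) hdn
  have hgle : Nat.gcd d n ≤ d := Nat.gcd_le_left n hd
  have hbez : (Nat.gcd d n : ℤ) = d * Nat.gcdA d n + n * Nat.gcdB d n := Nat.gcd_eq_gcd_ab d n
  set A : ℤ := Nat.gcdA d n with hA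
  set B : ℤ := Nat.gcdB d n with hB
  have hnz : (n : ℤ) ≠ 0 := by exact_mod_cast hn0.ne'
  set x : ℤ := A % n with hx
  have hx0 : 0 ≤ x := Int.emod_nonneg A hnz
  have hax : ((x.toNat : ℕ) : ℤ) = x := Int.toNat_of_nonneg hx0
  have key : (x.toNat * d) % n = Nat.gcd d n := by
    have h1 : ((x.toNat * d : ℕ) : ℤ) % (n : ℤ) = ((Nat.gcd d n : ℕ) : ℤ) := by
      push_cast
      rw [hax, hx]
      calc A % n * d % n = A * d % n := by
            conv_lhs => rw [Int.mul_emod]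
            conv_rhs => rw [Int.mul_emod]
            rw [Int.emod_emod_of_dvd _ dvd_rfl]
        _ = ((Nat.gcd d n : ℤ) - n * B) % n := by congr 1; linarith [hbez]
        _ = (Nat.gcd d n : ℤ) % n := by simp [Int.sub_mul_emod_self_left]
        _ = (Nat.gcd d n : ℤ) := Int.emod_eq_of_lt (by positivity) (by exact_mod_cast lt_of_le_of_lt hgle hdn)
    have h2 : (((x.toNat * d) % n : ℕ) : ℤ) = ((x.toNat * d : ℕ) : ℤ) % (n : ℤ) := by
      push_cast; ring
    have h3 : (((x.toNat * d) % n : ℕ) : ℤ) = ((Nat.gcd d n : ℕ) : ℤ) := by rw [h2, h1]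
    exact_mod_cast h3
  calc l.rotate (Nat.gcd d n) = l.rotate ((x.toNat * d) % n) := by rw [key]
    _ = l.rotate (x.toNat * d) := List.rotate_mod l _
    _ = l := pv_rotate_mul l d x.toNat h

-- a fixed rotation by g gives g-periodicity of the characters
lemma pv_period_of_rotate (l : List Char) (g : Nat) (hg : g ≤ l.length) (h : l.rotate g = l) :
    ∀ i, i + g < l.length → l[i]? = l[i + g]? := by
  intro i hi
  conv_lhs => rw [← h, List.rotate_eq_drop_append_take hg]
  rw [List.getElem?_append_left (by rw [List.length_drop]; omega), List.getElem?_drop]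
  congr 1
  omega

-- a g-periodic list of length m*g is the m-fold concatenation of its first g characters
lemma pv_flatten_of_period : ∀ (m g : Nat) (l : List Char), 0 < g → l.length = m * g →
    (∀ i, i + g < l.length → l[i]? = l[i + g]?) →
    (List.replicate m (l.take g)).flatten = l := by
  intro m
  induction m with
  | zero =>
    intro g l _ hlen _
    simp at hlen
    simp [hlen]
  | succ m ih =>
    intro g l hg hlen hp
    rw [Nat.succ_mul] at hlen
    have hg_le : g ≤ l.length := by omega
    have hl' : (l.drop g).length = m * g := by rw [List.length_drop]; omega
    have hp' : ∀ i, i + g < (l.drop g).length → (l.drop g)[i]? = (l.drop g)[i + g]? := by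
      intro i hi
      rw [List.length_drop] at hi
      rw [List.getElem?_drop, List.getElem?_drop]
      have h2 : g + (i + g) = (g + i) + g := by omega
      rw [h2]
      exact hp (g + i) (by omega)
    have hrep : (List.replicate m ((l.drop g).take g)).flatten
        = (List.replicate m (l.take g)).flatten := by
      rcases Nat.eq_zero_or_pos m with hm | hm
      · subst hm; rfl
      · have htake : (l.drop g).take g = l.take g := by
          apply List.ext_getElem?
          intro i
          rw [List.getElem?_take, List.getElem?_take]
          split
          · next hig =>
              rw [List.getElem?_drop]
              have h3 : i + g < l.length := by nlinarith
              rw [show g + i = i + g by omega]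
              exact (hp i h3).symm
          · rfl
        rw [htake]
    calc (List.replicate (m + 1) (l.take g)).flatten
        = l.take g ++ (List.replicate m (l.take g)).flatten := by simp [List.replicate_succ]
      _ = l.take g ++ (List.replicate m ((l.drop g).take g)).flatten := by rw [hrep]
      _ = l.take g ++ l.drop g := by rw [ih g (l.drop g) hg hl' hp']
      _ = l := List.take_append_drop g l

-- heart of the equivalence: a repetition count t exists iff a nontrivial fixed rotation exists
lemma pv_exists_divisor_iff_rotate (l : List Char) :
    (∃ t : Nat, 2 ≤ t ∧ t ≤ l.length ∧ l.length % t = 0 ∧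
        (List.replicate t (l.take (l.length / t))).flatten = l)
    ↔ (∃ d : Nat, 1 ≤ d ∧ d < l.length ∧ l.rotate d = l) := by
  set n := l.length with hn
  constructor
  · rintro ⟨t, ht2, htn, hmod, hflat⟩
    have hn0 : 0 < n := by omega
    have hd1 : 1 ≤ n / t := (Nat.one_le_div_iff (by omega)).mpr htn
    have hdn : n / t < n :=
      lt_of_le_of_lt (Nat.div_le_div_left (by omega : 2 ≤ t) (by omega)) (Nat.div_lt_self hn0 one_lt_two)
    refine ⟨n / t, hd1, hdn, ?_⟩
    have hw : (l.take (n / t)).length = n / t := by rw [List.length_take]; omega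
    obtain ⟨m, hm⟩ : ∃ m, t = m + 1 := ⟨t - 1, by omega⟩
    calc l.rotate (n / t) = l.rotate ((l.take (n / t)).length) := by rw [hw]
      _ = ((List.replicate t (l.take (n / t))).flatten).rotate ((l.take (n / t)).length) := by rw [hflat]
      _ = (List.replicate t (l.take (n / t))).flatten := by rw [hm]; exact pv_rotate_flatten_replicate _ m
      _ = l := hflat
  · rintro ⟨d, hd1, hdn, hrot⟩
    have hn0 : 0 < n := by omega
    set g := Nat.gcd d n with hg
    have hrotg : l.rotate g = l := pv_rotate_gcd l d (by omega) hdn hrot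
    have hgdvd : g ∣ n := Nat.gcd_dvd_right d n
    have hg0 : 0 < g := Nat.gcd_pos_of_pos_left n (by omega)
    have hgn : g < n := lt_of_le_of_lt (Nat.gcd_le_left n (by omega)) hdn
    have hmul : n / g * g = n := Nat.div_mul_cancel hgdvd
    have hdvd2 : (n / g) ∣ n := ⟨g, hmul.symm⟩
    refine ⟨n / g, ?_, Nat.div_le_self n g, ?_, ?_⟩
    · rcases Nat.lt_or_ge (n / g) 2 with h2 | h2
      · exfalso
        have h3 : n / g ≤ 1 := by omega
        nlinarith
      · exact h2
    · omega
    · rw [Nat.div_div_self hgdvd hn0.ne']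
      exact pv_flatten_of_period (n / g) g l hg0 hmul.symm (pv_period_of_rotate l g (le_of_lt hgn) hrotg)

-- evaluating the [1:-1] slice of the doubled list
lemma pv_slice_eval (l : List Char) (hl : l ≠ []) :
    PySem.List.slice (l ++ l) (some 1) (some (-1)) = ((l ++ l).drop 1).take (2 * l.length - 2) := by
  have hn : 1 ≤ l.length := List.length_pos_iff.mpr hl
  simp [PySem.List.slice, PySem.List.clampIdx]
  rw [if_neg (by omega)]
  congr 1
  · omega
  · rw [show min 1 (l.length + l.length) = 1 by omega, List.drop_one]

lemma pv_mod_natCast (a b : ℕ) : PySem.Int.mod (a : ℤ) (b : ℤ) = ((a % b : ℕ) : ℤ) := by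
  simp [PySem.Int.mod, Int.fmod_eq_emod]

lemma pv_floordiv_natCast (a b : ℕ) : PySem.Int.floordiv (a : ℤ) (b : ℤ) = ((a / b : ℕ) : ℤ) := by
  simp [PySem.Int.floordiv, Int.fdiv_eq_ediv]

-- the body of A's loop, in Nat terms
lemma pv_body_iff (l : List Char) (t : ℕ) :
    ((if PySem.Int.mod (l.length : ℤ) (t : ℤ) == 0 then
        PySem.List.pyRepeat (PySem.List.slice l none (some (PySem.Int.floordiv (l.length : ℤ) (t : ℤ)))) (t : ℤ) == l
      else false) = true)
    ↔ (l.length % t = 0 ∧ (List.replicate t (l.take (l.length / t))).flatten = l) := by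
  rw [pv_mod_natCast, pv_floordiv_natCast, PySem.List.slice_to_natCast]
  simp only [PySem.List.pyRepeat, Int.toNat_natCast]
  split
  · next hc =>
      simp only [beq_iff_eq] at hc ⊢
      have hc' : l.length % t = 0 := by exact_mod_cast hc
      simp [hc']
  · next hc =>
      simp only [beq_iff_eq] at hc
      constructor
      · intro h; cases h
      · rintro ⟨h1, -⟩
        exact absurd (by exact_mod_cast h1) hc

-- A returns true iff some repetition count t works
lemma pv_A_iff (int : Int) :
    repeating_number_part2 int = true ↔
    (∃ t : Nat, 2 ≤ t ∧ t ≤ (PySem.Int.toChars int).length ∧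
        (PySem.Int.toChars int).length % t = 0 ∧
        (List.replicate t ((PySem.Int.toChars int).take ((PySem.Int.toChars int).length / t))).flatten
          = PySem.Int.toChars int) := by
  set l := PySem.Int.toChars int with hl
  set n := l.length with hn
  show (PySem.List.pyRange 2 ((n : ℤ) + 1) 1).any (fun times =>
    if PySem.Int.mod (n : ℤ) times == 0 then
      PySem.List.pyRepeat (PySem.List.slice l none (some (PySem.Int.floordiv (n : ℤ) times))) times == l
    else false) = true ↔ _
  rw [PySem.List.pyRange_one, List.any_map, List.any_eq_true]
  constructor
  · rintro ⟨k, hk, hbody⟩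
    rw [List.mem_range] at hk
    simp only [Function.comp] at hbody
    rw [show ((2 : ℤ) + (k : ℤ)) = ((2 + k : ℕ) : ℤ) by push_cast; ring] at hbody
    have hb := (pv_body_iff l (2 + k) ).mp hbody
    exact ⟨2 + k, by omega, by omega, hb.1, hb.2⟩
  · rintro ⟨t, ht2, htn, hmod, hflat⟩
    refine ⟨t - 2, ?_, ?_⟩
    · rw [List.mem_range]
      omega
    · simp only [Function.comp]
      rw [show ((2 : ℤ) + ((t - 2 : ℕ) : ℤ)) = ((t : ℕ) : ℤ) by omega]
      exact (pv_body_iff l t).mpr ⟨hmod, hflat⟩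

-- B returns true iff some nontrivial rotation fixes the digit string
lemma pv_B_iff (int : Int) :
    repeating_number_part2_alt int = true ↔
    (∃ d : Nat, 1 ≤ d ∧ d < (PySem.Int.toChars int).length ∧
        (PySem.Int.toChars int).rotate d = PySem.Int.toChars int) := by
  set l := PySem.Int.toChars int with hl
  have hnil : l ≠ [] := pv_toChars_ne_nil int
  have hn1 : 1 ≤ l.length := List.length_pos_iff.mpr hnil
  set n := l.length with hn
  show PySem.Chars.isIn l (PySem.List.slice (l ++ l) (some 1) (some (-1))) = true ↔ _
  rw [pv_slice_eval l hnil, ← PySem.Chars.exists_prefix_drop_iff_isIn]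
  set m := ((l ++ l).drop 1).take (2 * n - 2) with hm
  have hml : m.length = 2 * n - 2 := by
    rw [hm, List.length_take, List.length_drop, List.length_append]
    omega
  constructor
  · rintro ⟨j, hpre⟩
    have hlen : l.length ≤ (m.drop j).length := hpre.length_le
    rw [List.length_drop, hml] at hlen
    have hj : j ≤ n - 2 ∧ 2 ≤ n := by omega
    have heq : l = (m.drop j).take n := by
      have := List.prefix_iff_eq_take.mp hpre
      rwa [← hn] at this
    have hstep : (m.drop j).take n = ((l ++ l).drop (1 + j)).take n := by
      rw [hm, List.drop_take, List.drop_drop, List.take_take]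
      congr 1
      omega
    refine ⟨1 + j, by omega, by omega, ?_⟩
    rw [← pv_drop_double_take l (1 + j) (by omega)]
    exact (heq.trans hstep).symm
  · rintro ⟨d, hd1, hdn, hrot⟩
    refine ⟨d - 1, ?_⟩
    rw [List.prefix_iff_eq_take, ← hn]
    have hstep : (m.drop (d - 1)).take n = ((l ++ l).drop d).take n := by
      rw [hm, List.drop_take, List.drop_drop, List.take_take]
      congr 1
      · omega
      · congr 1
        omega
    rw [hstep, pv_drop_double_take l d (by omega), hrot]

-- ===== VERDICT (by name: the statement is the Claim_ definition above) =====
theorem repeating_number_part2_spec : Claim_equal_repeating_number_part2 := by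
  intro int _
  unfold Spec_repeating_number_part2
  rw [Bool.eq_iff_iff, pv_A_iff, pv_B_iff, pv_exists_divisor_iff_rotate]
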